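-- pv_equiv track=rewrite | github.com/7b809/logic-gems | index_to_word_sequence.py | get_sentence_at_index
-- ===== SOURCE A (Python) =====
-- def get_sentence_at_index(lst, length, index):
--     # Convert index to base-12 and map to characters
--     sentence = []
--     base = len(lst)  # Base-12 since there are 12 characters
--     for _ in range(length):
--         remainder = index % base
--         sentence.append(lst[remainder])
--         index //= base
--     # Reverse the sentence since we computed from least to most significant digit
--     return ' '.join(sentence[::-1])
-- ===== SOURCE B (Python) =====
-- def get_sentence_at_index(lst, length, index):
--     # Divide and conquer on the digit positions: the words for positions [0, n) of q
--     # are those of q // base**(n//2) for the high part followed by positions [0, n//2) of q.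
--     base = len(lst)
--
--     def words(q, n):
--         if n == 1:
--             return [lst[q % base]]
--         half = n // 2
--         return words(q // base ** half, n - half) + words(q, half)
--
--     return ' '.join(words(index, length)) if length > 0 else ''
-- ===== Notes on version B (the rewrite author's own statement) =====
-- stated objective: alternative
-- what changed: B extracts the digit words by divide and conquer on the digit positions (one division by base**(n//2) splits the problem into a high and a low half, recursing to single-digit leaves emitted most-significant-first), instead of A's length sequential divmods with an accumulated quotient and a final slice reversal; Pre_ excludes empty lst with positive length, on which both programs raise ZeroDivisionError.
import Mathlib
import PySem

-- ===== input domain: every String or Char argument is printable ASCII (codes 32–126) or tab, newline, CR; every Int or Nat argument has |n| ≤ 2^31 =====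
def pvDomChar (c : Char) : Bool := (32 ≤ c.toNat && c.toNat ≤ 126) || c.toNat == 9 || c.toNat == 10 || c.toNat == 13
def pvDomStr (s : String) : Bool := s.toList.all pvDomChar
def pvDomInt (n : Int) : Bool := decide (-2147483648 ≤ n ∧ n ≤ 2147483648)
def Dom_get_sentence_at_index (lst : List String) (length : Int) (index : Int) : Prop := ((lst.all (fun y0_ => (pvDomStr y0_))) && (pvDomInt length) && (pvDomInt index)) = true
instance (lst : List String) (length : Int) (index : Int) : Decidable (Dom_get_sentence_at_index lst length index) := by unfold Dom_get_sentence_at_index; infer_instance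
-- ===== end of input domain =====

-- B extracts the digit words by divide and conquer on the digit positions (high half =
-- the words of q // base**(n//2)), instead of A's length-many sequential divmods plus a reversal.

-- ===== PORT A =====
def get_sentence_at_index (lst : List String) (length : Int) (index : Int) : String :=
  let base : Int := lst.length
  let st := (PySem.List.pyRange 0 length 1).foldl
    (fun (s : List String × Int) _ =>
      (s.1 ++ [PySem.List.pyGetD lst (PySem.Int.mod s.2 base) ""],
       PySem.Int.floordiv s.2 base))
    ([], index)
  PySem.Str.join " " ((PySem.List.slice? st.1 none none (-1)).getD [])

-- ===== PORT B =====
-- port of Source B's inner `words`; Python only calls it with n ≥ 1, so the `n ≤ 1` guard is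
-- exactly Python's `n == 1` test there (it also makes the recursion total at n = 0)
def pvWordsB (lst : List String) (base : Int) (n : Nat) (q : Int) : List String :=
  if n ≤ 1 then [PySem.List.pyGetD lst (PySem.Int.mod q base) ""]
  else
    pvWordsB lst base (n - n / 2) (PySem.Int.floordiv q (base ^ (n / 2))) ++
    pvWordsB lst base (n / 2) q
termination_by n
decreasing_by all_goals omega

def get_sentence_at_index_alt (lst : List String) (length : Int) (index : Int) : String :=
  let base : Int := lst.length
  if 0 < length then PySem.Str.join " " (pvWordsB lst base length.toNat index)
  else ""

-- ===== PRECONDITION & SPEC =====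
-- Pre_ excludes empty lst with positive length, on which both programs raise ZeroDivisionError.
def Pre_get_sentence_at_index (lst : List String) (length : Int) (index : Int) : Prop :=
  lst ≠ [] ∨ length ≤ 0
instance (lst : List String) (length : Int) (index : Int) : Decidable (Pre_get_sentence_at_index lst length index) := by unfold Pre_get_sentence_at_index; infer_instance

def pvWitness_get_sentence_at_index : List String × Int × Int := (["a", "b", "c"], 3, 14)

def Spec_get_sentence_at_index (lst : List String) (length : Int) (index : Int) (out : String) : Prop := out = get_sentence_at_index_alt lst length index
instance (lst : List String) (length : Int) (index : Int) (out : String) : Decidable (Spec_get_sentence_at_index lst length index out) := by unfold Spec_get_sentence_at_index; infer_instance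

-- ===== CLAIM (what is proved, stated in full; the proofs are below) =====
def Claim_equal_get_sentence_at_index : Prop := ∀ (lst : List String) (length : Int) (index : Int), Dom_get_sentence_at_index lst length index → Pre_get_sentence_at_index lst length index → Spec_get_sentence_at_index lst length index (get_sentence_at_index lst length index)

-- ===== LEMMAS AND PROOFS =====

-- a fold that ignores its list elements is an iterate of the step on the state
theorem pv_foldl_const {α β : Type} (f : β → β) (l : List α) (s : β) :
    l.foldl (fun s _ => f s) s = f^[l.length] s := by
  induction l generalizing s with
  | nil => rfl
  | cons x xs ih => simp [List.foldl_cons, ih, Function.iterate_succ_apply]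

-- A's loop step, named so the iterate lemma can be stated
def pvStepA (lst : List String) : List String × Int → List String × Int :=
  fun s =>
    (s.1 ++ [PySem.List.pyGetD lst (PySem.Int.mod s.2 (lst.length : Int)) ""],
     PySem.Int.floordiv s.2 (lst.length : Int))

theorem pv_foldA (lst : List String) (l : List Nat) (s : List String × Int) :
    l.foldl (fun (x : List String × Int) (_ : Nat) =>
      (x.1 ++ [PySem.List.pyGetD lst (PySem.Int.mod x.2 (lst.length : Int)) ""],
       PySem.Int.floordiv x.2 (lst.length : Int))) s = (pvStepA lst)^[l.length] s :=
  pv_foldl_const (pvStepA lst) l s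

-- the word for digit position k (counting from least significant)
def pvWord (lst : List String) (index : Int) (k : Nat) : String :=
  PySem.List.pyGetD lst (PySem.Int.mod (PySem.Int.floordiv index ((lst.length : Int) ^ k)) (lst.length : Int)) ""

theorem pv_fdiv_fdiv (i b c : Int) (hb : 0 < b) (hc : 0 < c) :
    PySem.Int.floordiv (PySem.Int.floordiv i b) c = PySem.Int.floordiv i (b * c) := by
  rw [PySem.Int.floordiv_eq_ediv_of_pos hb, PySem.Int.floordiv_eq_ediv_of_pos hc,
      PySem.Int.floordiv_eq_ediv_of_pos (by positivity)]
  exact Int.ediv_ediv_of_nonneg (le_of_lt hb)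

theorem pv_map_range_succ_lo {α : Type} (F : Nat → α) (n : Nat) :
    (List.range (n + 1)).map F = F 0 :: (List.range n).map (fun k => F (k + 1)) := by
  rw [List.range_succ_eq_map, List.map_cons, List.map_map]
  rfl

-- A's loop: iterating the A-step n times from (acc, i) appends the words LSB-first
theorem pv_iterA (lst : List String) (hl : lst ≠ []) (n : Nat) :
    ∀ (acc : List String) (i : Int),
      (pvStepA lst)^[n] (acc, i)
      = (acc ++ (List.range n).map (fun k => pvWord lst i k),
         PySem.Int.floordiv i ((lst.length : Int) ^ n)) := by
  have hb : (0 : Int) < (lst.length : Int) := by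
    have := List.length_pos_iff.mpr hl; exact_mod_cast this
  induction n with
  | zero =>
    intro acc i
    simp [pow_zero]
  | succ n ih =>
    intro acc i
    rw [Function.iterate_succ_apply,
        show pvStepA lst (acc, i)
          = (acc ++ [PySem.List.pyGetD lst (PySem.Int.mod i (lst.length : Int)) ""],
             PySem.Int.floordiv i (lst.length : Int)) from rfl,
        ih]
    rw [Prod.mk.injEq]
    refine ⟨?_, ?_⟩
    · have h0 : PySem.List.pyGetD lst (PySem.Int.mod i (lst.length : Int)) "" = pvWord lst i 0 := by
        simp [pvWord]
      have hk : ∀ k ∈ List.range n,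
          pvWord lst (PySem.Int.floordiv i (lst.length : Int)) k = pvWord lst i (k + 1) := by
        intro k _
        simp only [pvWord]
        rw [pv_fdiv_fdiv _ _ _ hb (by positivity), ← pow_succ']
      rw [h0, List.map_congr_left hk, pv_map_range_succ_lo]
      simp
    · rw [pv_fdiv_fdiv _ _ _ hb (by positivity), ← pow_succ']

-- B's divide-and-conquer digit extraction produces the reversed word list of the spec
theorem pv_wordsB_spec (lst : List String) (hl : lst ≠ []) :
    ∀ n, 1 ≤ n → ∀ q : Int,
      pvWordsB lst (lst.length : Int) n q
        = ((List.range n).map (fun k => pvWord lst q k)).reverse := by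
  have hb : (0 : Int) < (lst.length : Int) := by
    have := List.length_pos_iff.mpr hl; exact_mod_cast this
  intro n
  induction n using Nat.strong_induction_on with
  | _ n ih =>
    intro hn q
    by_cases h1 : n ≤ 1
    · have hn1 : n = 1 := by omega
      subst hn1
      rw [pvWordsB, if_pos (by omega)]
      have : pvWord lst q 0 = PySem.List.pyGetD lst (PySem.Int.mod q (lst.length : Int)) "" := by
        simp only [pvWord, pow_zero]
        rw [show PySem.Int.floordiv q 1 = q by
              rw [PySem.Int.floordiv_eq_ediv_of_pos (by norm_num), Int.ediv_one]]
      simp [this]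
    · rw [pvWordsB, if_neg h1]
      set half := n / 2 with hhalf
      have hhalf1 : 1 ≤ half := by omega
      have hrest1 : 1 ≤ n - half := by omega
      have hB : (0 : Int) < (lst.length : Int) ^ half := by positivity
      rw [ih (n - half) (by omega) hrest1, ih half (by omega) hhalf1]
      -- reassemble: range n splits at half
      have hrange : List.range n = List.range half ++ (List.range (n - half)).map (half + ·) := by
        rw [← List.range_add]
        congr 1
        omega
      rw [hrange, List.map_append, List.reverse_append, List.map_map]
      congr 1
      -- high half: digit half+k of q is digit k of q // base**half
      refine congrArg List.reverse (List.map_congr_left (fun k _ => ?_))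
      simp only [Function.comp, pvWord]
      rw [pv_fdiv_fdiv _ _ _ hB (by positivity), ← pow_add]

-- ===== VERDICT (by name: the statement is the Claim_ definition above) =====
theorem get_sentence_at_index_spec : Claim_equal_get_sentence_at_index := by
  intro lst length index _ hpre
  unfold Spec_get_sentence_at_index get_sentence_at_index get_sentence_at_index_alt
  by_cases hlen : length ≤ 0
  · rw [if_neg (by omega), PySem.List.pyRange_one_eq_nil (by omega)]
    simp [PySem.List.slice?_none_none_neg_one]
    rfl
  · have hl : lst ≠ [] := by
      rcases hpre with h | h
      · exact h
      · omega
    have hb : (0 : Int) < (lst.length : Int) := by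
      have := List.length_pos_iff.mpr hl; exact_mod_cast this
    rw [if_pos (by omega)]
    simp only
    rw [PySem.List.pyRange_one, List.foldl_map, pv_foldA lst]
    simp only [List.length_range]
    rw [pv_iterA lst hl _ [] index]
    rw [PySem.List.slice?_none_none_neg_one]
    simp only [Option.getD_some, List.nil_append]
    set n : Nat := length.toNat with hn
    have hn1 : 1 ≤ n := by omega
    have hsub : (length - 0).toNat = n := by omega
    rw [hsub, pv_wordsB_spec lst hl n hn1 index]
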